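-- pv_equiv track=rewrite | github.com/awc789/Motion-Modal-Recognition-Based-on-Machine-Learning-Methods | setting.py | judge_transform
-- ===== SOURCE A (Python) =====
-- def judge_transform(list, number):
--     if number in list:
--         return number
--     else:
--         new_number = number
--         while new_number not in list:
--             new_number += 1
--         return new_number
-- ===== SOURCE B (Python) =====
-- def judge_transform(list, number):
--     return min(x for x in list if x >= number)
-- ===== Notes on version B (the rewrite author's own statement) =====
-- stated objective: simpler
-- what changed: Replaces the counting-up membership loop with a single pass taking the minimum of the elements >= number.
import Mathlib
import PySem

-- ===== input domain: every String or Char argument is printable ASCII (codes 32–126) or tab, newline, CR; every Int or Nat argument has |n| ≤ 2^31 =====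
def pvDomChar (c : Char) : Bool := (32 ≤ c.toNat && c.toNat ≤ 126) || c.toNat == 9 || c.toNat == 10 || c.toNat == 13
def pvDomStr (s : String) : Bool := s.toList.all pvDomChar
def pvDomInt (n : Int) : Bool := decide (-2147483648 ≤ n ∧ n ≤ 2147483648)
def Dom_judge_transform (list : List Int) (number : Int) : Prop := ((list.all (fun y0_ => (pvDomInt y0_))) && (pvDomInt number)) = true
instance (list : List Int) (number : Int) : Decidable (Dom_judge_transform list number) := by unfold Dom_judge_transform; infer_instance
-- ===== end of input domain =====

-- B replaces A's count-up-and-rescan loop by one pass taking the minimum of the elements ≥ number (a single scan instead of repeated membership scans).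
-- Pre_ excludes inputs with no element ≥ number: there A's while loop never terminates (and B raises ValueError).

-- ===== PORT A =====
-- A's unbounded `while new_number not in list` loop, made total with fuel; the fuel
-- chosen below is sufficient whenever Pre_ holds, so it only guards termination.
def judgeLoopA (list : List Int) (n : Int) : Nat → Int
  | 0 => n
  | f + 1 => if n ∈ list then n else judgeLoopA list (n + 1) f

def judge_transform (list : List Int) (number : Int) : Int :=
  if number ∈ list then number
  else judgeLoopA list number ((list.foldl max number - number).toNat + 1)

-- ===== PORT B =====
def judge_transform_alt (list : List Int) (number : Int) : Int :=
  (PySem.List.min? (list.filter (fun x => decide (number ≤ x))) (fun x => x)).getD 0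

-- ===== PRECONDITION & SPEC =====
-- Pre_ excludes exactly the inputs where A's while loop never terminates (no element ≥ number).
def Pre_judge_transform (list : List Int) (number : Int) : Prop :=
  ∃ x ∈ list, number ≤ x
instance (list : List Int) (number : Int) : Decidable (Pre_judge_transform list number) := by
  unfold Pre_judge_transform; infer_instance

def pvWitness_judge_transform : List Int × Int := ([3, 7, 5], 4)

def Spec_judge_transform (list : List Int) (number : Int) (out : Int) : Prop := out = judge_transform_alt list number
instance (list : List Int) (number : Int) (out : Int) : Decidable (Spec_judge_transform list number out) := by unfold Spec_judge_transform; infer_instance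

-- ===== CLAIM (what is proved, stated in full; the proofs are below) =====
def Claim_equal_judge_transform : Prop := ∀ (list : List Int) (number : Int), Dom_judge_transform list number → Pre_judge_transform list number → Spec_judge_transform list number (judge_transform list number)

-- ===== LEMMAS AND PROOFS =====

-- every element is ≤ the running max
theorem le_foldl_max (l : List Int) (a : Int) : (∀ x ∈ l, x ≤ l.foldl max a) ∧ a ≤ l.foldl max a := by
  induction l generalizing a with
  | nil => simp
  | cons hd t ih =>
    refine ⟨?_, ?_⟩
    · intro x hx
      rcases List.mem_cons.mp hx with rfl | hx
      · exact le_trans (le_max_right a x) (ih (max a x)).2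
      · exact (ih (max a hd)).1 x hx
    · exact le_trans (le_max_left a hd) (ih (max a hd)).2

-- the loop reaches m, the least element ≥ its start, given enough fuel
theorem judgeLoopA_eq (list : List Int) (m : Int) (hm : m ∈ list) :
    ∀ fuel n, n ≤ m → (∀ x ∈ list, n ≤ x → m ≤ x) → (m - n).toNat < fuel →
      judgeLoopA list n fuel = m := by
  intro fuel
  induction fuel with
  | zero => omega
  | succ f ih =>
    intro n hnm hleast hfuel
    simp only [judgeLoopA]
    by_cases hmem : n ∈ list
    · have := hleast n hmem le_rfl
      simp [hmem]; omega
    · have hne : n ≠ m := fun h => hmem (h ▸ hm)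
      simp only [hmem, if_false]
      exact ih (n + 1) (by omega)
        (fun x hx hnx => hleast x hx (by omega))
        (by omega)

-- B's result is the least element ≥ number
theorem alt_spec (list : List Int) (number : Int) (h : Pre_judge_transform list number) :
    judge_transform_alt list number ∈ list ∧
    number ≤ judge_transform_alt list number ∧
    ∀ x ∈ list, number ≤ x → judge_transform_alt list number ≤ x := by
  obtain ⟨x, hx, hnx⟩ := h
  have hne : list.filter (fun x => decide (number ≤ x)) ≠ [] := by
    intro hnil
    have : x ∈ list.filter (fun x => decide (number ≤ x)) := by
      simp [List.mem_filter, hx, hnx]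
    simp [hnil] at this
  obtain ⟨m, hm⟩ : ∃ m, PySem.List.min? (list.filter (fun x => decide (number ≤ x))) (fun x => x) = some m := by
    cases hmin : PySem.List.min? (list.filter (fun x => decide (number ≤ x))) (fun x => x) with
    | none => exact absurd ((PySem.List.min?_eq_none_iff _ _).mp hmin) hne
    | some m => exact ⟨m, rfl⟩
  have hmem := PySem.List.min?_mem hm
  have hlb := PySem.List.min?_isMin hm
  simp only [List.mem_filter, decide_eq_true_eq] at hmem hlb
  unfold judge_transform_alt
  rw [hm]
  exact ⟨hmem.1, hmem.2, fun y hy hny => hlb y ⟨hy, hny⟩⟩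

-- ===== VERDICT (by name: the statement is the Claim_ definition above) =====
theorem judge_transform_spec : Claim_equal_judge_transform := by
  intro list number _ hpre
  obtain ⟨hmem, hge, hleast⟩ := alt_spec list number hpre
  unfold Spec_judge_transform judge_transform
  by_cases hn : number ∈ list
  · simp only [hn, if_true]
    exact le_antisymm hge (hleast number hn le_rfl)
  · simp only [hn, if_false]
    have hbound := (le_foldl_max list number).1 _ hmem
    exact judgeLoopA_eq list (judge_transform_alt list number) hmem _ number hge
      (fun x hx h => hleast x hx h)
      (by omega)
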